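-- pv_equiv track=rewrite | github.com/hulkdesignQ/graphrag-orchestration | tests/unit/test_focused_text.py | focused_text_NEW
-- ===== SOURCE A (Python) =====
-- def focused_text_NEW(sentence_texts, full_text, hit_indices):
--     """NEW approach: pre-computed hit indices from graph MENTIONS edges."""
--     if not sentence_texts or not hit_indices:
--         return full_text
--
--     ranges = []
--     for idx in sorted(hit_indices):
--         if idx < 0 or idx >= len(sentence_texts):
--             continue
--         lo = max(0, idx - 1)
--         hi = min(len(sentence_texts), idx + 2)
--         if ranges and lo <= ranges[-1][1]:
--             ranges[-1] = (ranges[-1][0], hi)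
--         else:
--             ranges.append((lo, hi))
--
--     if not ranges:
--         return full_text
--
--     windows = []
--     for lo, hi in ranges:
--         windows.append(" ".join(sentence_texts[lo:hi]))
--     return " [...] ".join(windows)
-- ===== SOURCE B (Python) =====
-- def focused_text_NEW(sentence_texts, full_text, hit_indices):
--     """NEW approach: pre-computed hit indices from graph MENTIONS edges."""
--     if not sentence_texts or not hit_indices:
--         return full_text
--
--     n = len(sentence_texts)
--     marked = [False] * n
--     for idx in hit_indices:
--         if 0 <= idx < n:
--             for p in range(max(0, idx - 1), min(n, idx + 2)):
--                 marked[p] = True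
--
--     windows = []
--     p = 0
--     while p < n:
--         if marked[p]:
--             lo = p
--             while p < n and marked[p]:
--                 p += 1
--             windows.append(" ".join(sentence_texts[lo:p]))
--         else:
--             p += 1
--
--     if not windows:
--         return full_text
--     return " [...] ".join(windows)
-- ===== Notes on version B (the rewrite author's own statement) =====
-- stated objective: alternative
-- what changed: B replaces A's sort-then-merge of interval pairs by a boolean mark array: each in-range hit marks its 3-sentence neighbourhood, and one left-to-right scan emits each maximal run of marked sentences as a window, so no sorting and no interval-merging bookkeeping is needed.
import Mathlib
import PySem

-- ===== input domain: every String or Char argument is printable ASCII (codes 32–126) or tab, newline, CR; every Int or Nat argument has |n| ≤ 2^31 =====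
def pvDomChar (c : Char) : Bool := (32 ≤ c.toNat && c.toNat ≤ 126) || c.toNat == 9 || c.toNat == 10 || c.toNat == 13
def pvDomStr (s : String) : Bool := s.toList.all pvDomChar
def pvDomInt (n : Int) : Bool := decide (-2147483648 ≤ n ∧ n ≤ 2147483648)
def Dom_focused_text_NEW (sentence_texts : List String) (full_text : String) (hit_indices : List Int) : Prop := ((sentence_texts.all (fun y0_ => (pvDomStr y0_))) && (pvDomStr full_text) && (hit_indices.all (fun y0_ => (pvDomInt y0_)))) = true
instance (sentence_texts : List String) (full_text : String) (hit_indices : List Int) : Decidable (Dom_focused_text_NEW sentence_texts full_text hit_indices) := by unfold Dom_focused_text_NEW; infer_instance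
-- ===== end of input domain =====

-- B replaces A's sort-then-merge of interval pairs by a mark array + one run-collecting scan
-- (objective: alternative algorithm, same exact output).

-- ===== PORT A =====
-- loop body of A's `for idx in sorted(hit_indices)` (named so the proofs can speak about it)
def pvStepA (n : Int) (ranges : List (Int × Int)) (idx : Int) : List (Int × Int) :=
  if idx < 0 ∨ idx ≥ n then ranges
  else
    let lo := max 0 (idx - 1)
    let hi := min n (idx + 2)
    match ranges.getLast? with
    | some (plo, phi) =>
        if lo ≤ phi then ranges.dropLast ++ [(plo, hi)] else ranges ++ [(lo, hi)]
    | none => ranges ++ [(lo, hi)]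

def focused_text_NEW (sentence_texts : List String) (full_text : String) (hit_indices : List Int) : String :=
  if sentence_texts = [] ∨ hit_indices = [] then full_text
  else
    let n : Int := PySem.List.len sentence_texts
    let ranges : List (Int × Int) :=
      (PySem.List.sorted hit_indices (fun x => x) false).foldl (pvStepA n) []
    if ranges = [] then full_text
    else
      PySem.Str.join " [...] "
        (ranges.map (fun r => PySem.Str.join " " (PySem.List.slice sentence_texts (some r.1) (some r.2))))

-- ===== PORT B =====
-- loop body of B's marking pass (`for idx in hit_indices: … marked[p] = True`)
def pvMarkStep (n : Int) (marked : List Bool) (idx : Int) : List Bool :=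
  if 0 ≤ idx ∧ idx < n then
    (PySem.List.pyRange (max 0 (idx - 1)) (min n (idx + 2)) 1).foldl
      (fun m p => PySem.List.pySetD m p true) marked
  else marked

-- B's scanning `while` loops: emit each maximal run of consecutive `true`s as a (lo, hi) pair
def pvRunsFrom (bs : List Bool) (p : Int) : List (Int × Int) :=
  match bs with
  | [] => []
  | false :: rest => pvRunsFrom rest (p + 1)
  | true :: rest =>
      let k := (rest.takeWhile (fun b => b)).length
      (p, p + 1 + (k : Int)) :: pvRunsFrom (rest.drop k) (p + 1 + (k : Int))
termination_by bs.length

def focused_text_NEW_alt (sentence_texts : List String) (full_text : String) (hit_indices : List Int) : String :=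
  if sentence_texts = [] ∨ hit_indices = [] then full_text
  else
    let n : Int := PySem.List.len sentence_texts
    let marked : List Bool :=
      hit_indices.foldl (pvMarkStep n) (List.replicate sentence_texts.length false)
    let windows : List String :=
      (pvRunsFrom marked 0).map
        (fun r => PySem.Str.join " " (PySem.List.slice sentence_texts (some r.1) (some r.2)))
    if windows = [] then full_text
    else PySem.Str.join " [...] " windows

-- ===== PRECONDITION & SPEC =====
def Spec_focused_text_NEW (sentence_texts : List String) (full_text : String) (hit_indices : List Int) (out : String) : Prop := out = focused_text_NEW_alt sentence_texts full_text hit_indices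
instance (sentence_texts : List String) (full_text : String) (hit_indices : List Int) (out : String) : Decidable (Spec_focused_text_NEW sentence_texts full_text hit_indices out) := by unfold Spec_focused_text_NEW; infer_instance

-- ===== CLAIM (what is proved, stated in full; the proofs are below) =====
def Claim_equal_focused_text_NEW : Prop := ∀ (sentence_texts : List String) (full_text : String) (hit_indices : List Int), Dom_focused_text_NEW sentence_texts full_text hit_indices → Spec_focused_text_NEW sentence_texts full_text hit_indices (focused_text_NEW sentence_texts full_text hit_indices)

-- ===== LEMMAS AND PROOFS =====

-- "p is one of the (≤3) sentence positions marked by hit idx" (the clamp is implicit: only p < n matters)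
def pvMarkB (n idx p : Int) : Bool := decide (0 ≤ idx ∧ idx < n ∧ idx - 1 ≤ p ∧ p ≤ idx + 1 ∧ 0 ≤ p ∧ p < n)

-- `rs` is the list of MAXIMAL runs of `m` on positions [c, n), in order
def pvIsDecomp (m : Int → Bool) (n : Int) : Int → List (Int × Int) → Prop
  | c, [] => ∀ p, c ≤ p → p < n → m p = false
  | c, (l, h) :: rs =>
      c ≤ l ∧ l < h ∧ h ≤ n ∧
      (∀ p, c ≤ p → p < l → m p = false) ∧
      (∀ p, l ≤ p → p < h → m p = true) ∧
      (h = n ∨ m h = false) ∧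
      pvIsDecomp m n (h + 1) rs

lemma pvMarkB_eq (n idx : Int) (h0 : 0 ≤ idx) (h1 : idx < n) (p : Int) :
    pvMarkB n idx p = decide (max 0 (idx - 1) ≤ p ∧ p < min n (idx + 2)) := by
  simp only [pvMarkB, decide_eq_decide]
  omega

lemma pvIsDecomp_unique : ∀ (rs rs' : List (Int × Int)) (m : Int → Bool) (n c : Int),
    pvIsDecomp m n c rs → pvIsDecomp m n c rs' → rs = rs' := by
  intro rs
  induction rs with
  | nil =>
    intro rs' m n c h1 h2
    cases rs' with
    | nil => rfl
    | cons a t =>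
      obtain ⟨l, h⟩ := a
      obtain ⟨hcl, hlh, hhn, _, hmk, _, _⟩ := h2
      have := h1 l hcl (by omega)
      have := hmk l le_rfl hlh
      simp_all
  | cons a t ih =>
    intro rs' m n c h1 h2
    obtain ⟨l, h⟩ := a
    cases rs' with
    | nil =>
      obtain ⟨hcl, hlh, hhn, _, hmk, _, _⟩ := h1
      have := h2 l hcl (by omega)
      have := hmk l le_rfl hlh
      simp_all
    | cons a' t' =>
      obtain ⟨l', h'⟩ := a'
      obtain ⟨hcl, hlh, hhn, hgap, hmk, hend, htl⟩ := h1
      obtain ⟨hcl', hlh', hhn', hgap', hmk', hend', htl'⟩ := h2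
      have hll : l = l' := by
        rcases lt_trichotomy l l' with hlt | heq | hgt
        · have := hgap' l hcl hlt
          have := hmk l le_rfl hlh
          simp_all
        · exact heq
        · have := hgap l' hcl' hgt
          have := hmk' l' le_rfl hlh'
          simp_all
      subst hll
      have hhh : h = h' := by
        rcases lt_trichotomy h h' with hlt | heq | hgt
        · have := hmk' h (by omega) hlt
          rcases hend with he | he
          · omega
          · simp_all
        · exact heq
        · have := hmk h' (by omega) hgt
          rcases hend' with he | he
          · omega
          · simp_all
      subst hhh
      have := ih t' m n (h + 1) htl htl'
      simp [this]

lemma pvDecomp_snoc_le (m : Int → Bool) (n : Int) :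
    ∀ (rs : List (Int × Int)) (c l h : Int), pvIsDecomp m n c (rs ++ [(l, h)]) → c ≤ l ∧ l < h := by
  intro rs
  induction rs with
  | nil => intro c l h hd; exact ⟨hd.1, hd.2.1⟩
  | cons a t ih =>
    intro c l h hd
    obtain ⟨a1, a2⟩ := a
    obtain ⟨hcl, hlh, _, _, _, _, htl⟩ := hd
    have := ih (a2 + 1) l h htl
    omega

-- merging the new hit's interval into the last range
lemma pvUpdate_last (m m' : Int → Bool) (n lo hi' : Int)
    (hm' : ∀ p, m' p = (m p || decide (lo ≤ p ∧ p < hi'))) (hn : hi' ≤ n) :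
    ∀ (rs : List (Int × Int)) (c l h : Int), pvIsDecomp m n c (rs ++ [(l, h)]) →
      l ≤ lo → lo ≤ h → h ≤ hi' →
      pvIsDecomp m' n c (rs ++ [(l, hi')]) := by
  intro rs
  induction rs with
  | nil =>
    intro c l h hd hllo hloh hhh
    obtain ⟨hcl, hlh, hhn, hgap, hmk, hend, htl⟩ := hd
    refine ⟨hcl, by omega, hn, ?_, ?_, ?_, ?_⟩
    · intro p hp hpl
      have := hgap p hp hpl
      simp [hm', this]; omega
    · intro p hp hph
      by_cases hc : p < h
      · simp [hm', hmk p hp hc]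
      · simp [hm']; right; omega
    · by_cases he : hi' = n
      · left; exact he
      · right
        have hmhi : m hi' = false := by
          by_cases hhi : hi' = h
          · rcases hend with h1 | h1
            · omega
            · rw [hhi]; exact h1
          · exact htl hi' (by omega) (by omega)
        simp [hm', hmhi]
    · intro p hp hpn
      have hmp : m p = false := htl p (by omega) hpn
      simp [hm', hmp]; omega
  | cons a t ih =>
    intro c l h hd hllo hloh hhh
    obtain ⟨a1, a2⟩ := a
    obtain ⟨hca, hab, hbn, hgap, hmk, hend, htl⟩ := hd
    obtain ⟨ha2l, hlh2⟩ := pvDecomp_snoc_le m n t (a2 + 1) l h htl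
    refine ⟨hca, hab, hbn, ?_, ?_, ?_, ih (a2 + 1) l h htl hllo hloh hhh⟩
    · intro p hp hpl
      have := hgap p hp hpl
      simp [hm', this]; omega
    · intro p hp hpb
      simp [hm', hmk p hp hpb]
    · rcases hend with h1 | h1
      · left; exact h1
      · right; simp [hm', h1]; omega

-- appending the new hit's interval as a fresh range after a gap
lemma pvAppend_range (m m' : Int → Bool) (n lo hi : Int)
    (hm' : ∀ p, m' p = (m p || decide (lo ≤ p ∧ p < hi))) (hlh : lo < hi) (hhn : hi ≤ n) :
    ∀ (rs : List (Int × Int)) (c l h : Int), pvIsDecomp m n c (rs ++ [(l, h)]) → h < lo →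
      pvIsDecomp m' n c (rs ++ [(l, h), (lo, hi)]) := by
  intro rs
  induction rs with
  | nil =>
    intro c l h hd hhlo
    obtain ⟨hcl, hlh2, hhn2, hgap, hmk, hend, htl⟩ := hd
    refine ⟨hcl, hlh2, by omega, ?_, ?_, ?_, ?_⟩
    · intro p hp hpl
      have := hgap p hp hpl
      simp [hm', this]; omega
    · intro p hp hph
      simp [hm', hmk p hp hph]
    · right
      have hmh : m h = false := by
        rcases hend with h1 | h1
        · omega
        · exact h1
      simp [hm', hmh]; omega
    · refine ⟨by omega, hlh, hhn, ?_, ?_, ?_, ?_⟩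
      · intro p hp hpl
        have := htl p (by omega) (by omega)
        simp [hm', this]; omega
      · intro p hp hph
        simp [hm']; right; omega
      · by_cases he : hi = n
        · left; exact he
        · right
          have := htl hi (by omega) (by omega)
          simp [hm', this]
      · intro p hp hpn
        have := htl p (by omega) hpn
        simp [hm', this]; omega
  | cons a t ih =>
    intro c l h hd hhlo
    obtain ⟨a1, a2⟩ := a
    obtain ⟨hca, hab, hbn, hgap, hmk, hend, htl⟩ := hd
    obtain ⟨ha2l, hlh2⟩ := pvDecomp_snoc_le m n t (a2 + 1) l h htl
    refine ⟨hca, hab, hbn, ?_, ?_, ?_, ih (a2 + 1) l h htl hhlo⟩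
    · intro p hp hpl
      have := hgap p hp hpl
      simp [hm', this]; omega
    · intro p hp hpb
      simp [hm', hmk p hp hpb]
    · rcases hend with h1 | h1
      · left; exact h1
      · right; simp [hm', h1]; omega

lemma pvAppend_range_nil (m m' : Int → Bool) (n lo hi c : Int)
    (hm' : ∀ p, m' p = (m p || decide (lo ≤ p ∧ p < hi)))
    (hmf : ∀ p, m p = false) (hc : c ≤ lo) (hlh : lo < hi) (hhn : hi ≤ n) :
    pvIsDecomp m' n c [(lo, hi)] := by
  refine ⟨hc, hlh, hhn, ?_, ?_, ?_, ?_⟩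
  · intro p hp hpl
    simp [hm', hmf]; omega
  · intro p hp hph
    simp [hm']; right; omega
  · by_cases he : hi = n
    · left; exact he
    · right; simp [hm', hmf]
  · intro p hp hpn
    simp [hm', hmf]; omega

-- invariant of A's fold over the sorted hit list
lemma pvMergeA_decomp (n : Int) : ∀ (V : List Int) (ranges : List (Int × Int)) (m : Int → Bool),
    V.Pairwise (· ≤ ·) →
    pvIsDecomp m n 0 ranges →
    (ranges = [] → ∀ p, m p = false) →
    (∀ rs plo phi, ranges = rs ++ [(plo, phi)] →
        ∃ J, 0 ≤ J ∧ J < n ∧ phi = min n (J + 2) ∧ plo ≤ max 0 (J - 1) ∧ ∀ i ∈ V, J ≤ i) →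
    pvIsDecomp (fun p => m p || V.any (fun i => pvMarkB n i p)) n 0 (V.foldl (pvStepA n) ranges) := by
  intro V
  induction V with
  | nil =>
    intro ranges m _ hdec _ _
    simpa using hdec
  | cons i V ih =>
    intro ranges m hpw hdec hemp hlast
    rw [List.pairwise_cons] at hpw
    obtain ⟨hiV, hpwV⟩ := hpw
    have hfun : (fun p => m p || (i :: V).any (fun j => pvMarkB n j p))
        = (fun p => (m p || pvMarkB n i p) || V.any (fun j => pvMarkB n j p)) := by
      funext p; simp [Bool.or_assoc]
    rw [List.foldl_cons, hfun]
    by_cases hv : i < 0 ∨ i ≥ n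
    · -- out-of-range hit: skipped, marks nothing
      have hstep : pvStepA n ranges i = ranges := by
        simp only [pvStepA, if_pos hv]
      have hmb : ∀ p, pvMarkB n i p = false := by
        intro p; simp only [pvMarkB, decide_eq_false_iff_not]; omega
      rw [hstep]
      have hfun2 : (fun p => (m p || pvMarkB n i p) || V.any (fun j => pvMarkB n j p))
          = (fun p => m p || V.any (fun j => pvMarkB n j p)) := by
        funext p; rw [hmb p]; simp
      rw [hfun2]
      exact ih ranges m hpwV hdec hemp (fun rs plo phi heq => by
        obtain ⟨J, h1, h2, h3, h4, h5⟩ := hlast rs plo phi heq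
        exact ⟨J, h1, h2, h3, h4, fun j hj => h5 j (List.mem_cons_of_mem i hj)⟩)
    · have h0' : 0 ≤ i := by omega
      have h1 : i < n := by omega
      have hm1 : ∀ p, (m p || pvMarkB n i p)
          = (m p || decide (max 0 (i - 1) ≤ p ∧ p < min n (i + 2))) := by
        intro p; rw [pvMarkB_eq n i h0' h1 p]
      have hlohi : max 0 (i - 1) < min n (i + 2) := by omega
      have hhin : min n (i + 2) ≤ n := by omega
      rcases List.eq_nil_or_concat ranges with hrnil | ⟨rs₀, ⟨plo, phi⟩, hrc⟩
      · -- no range yet: append the first one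
        subst hrnil
        have hstep : pvStepA n [] i = [(max 0 (i - 1), min n (i + 2))] := by
          simp only [pvStepA, if_neg (by omega : ¬(i < 0 ∨ i ≥ n))]
          simp
        rw [hstep]
        have hmf : ∀ p, m p = false := hemp rfl
        refine ih _ _ hpwV ?_ (by simp) ?_
        · exact pvAppend_range_nil m _ n _ _ 0 hm1 hmf (by omega) hlohi hhin
        · intro rs plo phi heq
          cases rs with
          | nil =>
            simp only [List.nil_append, List.cons.injEq, Prod.mk.injEq, and_true] at heq
            exact ⟨i, h0', h1, by omega, by omega, hiV⟩
          | cons b t =>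
            simp only [List.cons_append, List.cons.injEq] at heq
            have h2 := congrArg List.length heq.2
            simp at h2
      · -- there is a last range (plo, phi)
        rw [List.concat_eq_append] at hrc
        subst hrc
        obtain ⟨J, hJ0, hJn, hphi, hplo, hJle⟩ := hlast rs₀ plo phi rfl
        have hJi : J ≤ i := hJle i (List.mem_cons_self)
        have hstep0 : pvStepA n (rs₀ ++ [(plo, phi)]) i =
            (if max 0 (i - 1) ≤ phi then rs₀ ++ [(plo, min n (i + 2))]
             else (rs₀ ++ [(plo, phi)]) ++ [(max 0 (i - 1), min n (i + 2))]) := by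
          simp only [pvStepA, if_neg (by omega : ¬(i < 0 ∨ i ≥ n)), List.getLast?_concat,
            List.dropLast_concat]
        by_cases hmerge : max 0 (i - 1) ≤ phi
        · rw [hstep0, if_pos hmerge]
          refine ih _ _ hpwV ?_ (by simp) ?_
          · exact pvUpdate_last m _ n _ _ hm1 hhin rs₀ 0 plo phi hdec (by omega) hmerge (by omega)
          · intro rs plo' phi' heq
            obtain ⟨hrs, hpp⟩ : rs₀ = rs ∧ (plo, min n (i + 2)) = (plo', phi') := by
              simpa using List.append_inj' heq rfl
            rw [Prod.mk.injEq] at hpp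
            obtain ⟨hp1, hp2⟩ := hpp
            exact ⟨i, h0', h1, by omega, by omega, hiV⟩
        · rw [hstep0, if_neg hmerge]
          rw [List.append_assoc]
          refine ih _ _ hpwV ?_ (by simp) ?_
          · show pvIsDecomp _ n 0 (rs₀ ++ [(plo, phi), (max 0 (i - 1), min n (i + 2))])
            exact pvAppend_range m _ n _ _ hm1 hlohi hhin rs₀ 0 plo phi hdec (by omega)
          · intro rs plo' phi' heq
            rw [← List.append_assoc] at heq
            obtain ⟨hrs, hpp⟩ : rs₀ ++ [(plo, phi)] = rs ∧ (max 0 (i - 1), min n (i + 2)) = (plo', phi') := by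
              simpa using List.append_inj' heq rfl
            rw [Prod.mk.injEq] at hpp
            exact ⟨i, h0', h1, hpp.2.symm, by omega, hiV⟩

-- the two bound-shifting facts for the scan
lemma pvLower_bound (m : Int → Bool) (n c : Int) (rs : List (Int × Int))
    (h : pvIsDecomp m n (c + 1) rs) (hc : m c = false) : pvIsDecomp m n c rs := by
  cases rs with
  | nil =>
    intro p hp hpn
    rcases eq_or_lt_of_le hp with he | hl
    · simpa [← he] using hc
    · exact h p (by omega) hpn
  | cons a t =>
    obtain ⟨l, hh⟩ := a
    obtain ⟨hcl, hlh, hhn, hgap, hmk, hend, htl⟩ := h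
    refine ⟨by omega, hlh, hhn, ?_, hmk, hend, htl⟩
    intro p hp hpl
    rcases eq_or_lt_of_le hp with he | hlt
    · simpa [← he] using hc
    · exact hgap p (by omega) hpl

lemma pvRaise_bound (m : Int → Bool) (n c : Int) (rs : List (Int × Int))
    (h : pvIsDecomp m n c rs) (hc : n ≤ c ∨ m c = false) : pvIsDecomp m n (c + 1) rs := by
  cases rs with
  | nil => intro p hp hpn; exact h p (by omega) hpn
  | cons a t =>
    obtain ⟨l, hh⟩ := a
    obtain ⟨hcl, hlh, hhn, hgap, hmk, hend, htl⟩ := h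
    have hcl' : c + 1 ≤ l := by
      rcases eq_or_lt_of_le hcl with he | hl
      · exfalso
        have := hmk l le_rfl hlh
        rcases hc with h1 | h1
        · omega
        · rw [he] at h1; simp_all
      · omega
    exact ⟨hcl', hlh, hhn, fun p hp hpl => hgap p (by omega) hpl, hmk, hend, htl⟩

lemma pvTakeWhile_id_true : ∀ (l : List Bool) (j : Nat),
    j < (l.takeWhile (fun b => b)).length → l.getD j false = true := by
  intro l
  induction l with
  | nil => simp
  | cons b t ih =>
    intro j hj
    cases b with
    | false => simp at hj
    | true =>
      cases j with
      | zero => simp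
      | succ j' =>
        simp only [List.takeWhile_cons_of_pos, List.length_cons] at hj
        simpa using ih j' (by omega)

lemma pvTakeWhile_id_stop : ∀ (l : List Bool),
    (l.takeWhile (fun b => b)).length < l.length →
    l.getD (l.takeWhile (fun b => b)).length false = false := by
  intro l
  induction l with
  | nil => simp
  | cons b t ih =>
    cases b with
    | false => simp
    | true =>
      intro hl
      simp only [List.takeWhile_cons_of_pos, List.length_cons] at hl ⊢
      simpa using ih (by omega)

lemma pvRunsFrom_decomp (m : Int → Bool) (n : Int) : ∀ (bs : List Bool) (p : Int),
    p + bs.length = n → (∀ k : Nat, k < bs.length → bs.getD k false = m (p + k)) →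
    pvIsDecomp m n p (pvRunsFrom bs p) := by
  intro bs p
  induction bs, p using pvRunsFrom.induct with
  | case1 p =>
    intro hlen hget
    rw [pvRunsFrom]
    intro q hq1 hq2
    simp at hlen
    omega
  | case2 p rest ih =>
    intro hlen hget
    rw [pvRunsFrom]
    have hm : m p = false := by
      have := hget 0 (by simp)
      simpa using this.symm
    refine pvLower_bound m n p _ (ih ?_ ?_) hm
    · simp at hlen ⊢; omega
    · intro k hk
      have := hget (k + 1) (by simpa using Nat.succ_lt_succ hk)
      simp only [List.getD_cons_succ] at this
      rw [this]; congr 1; push_cast; ring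
  | case3 p rest k ih =>
    intro hlen hget
    rw [pvRunsFrom]
    simp only [List.length_cons] at hlen
    have hkle : k ≤ rest.length := (List.takeWhile_sublist _).length_le
    have hend : (p + 1 + (k : Int)) = n ∨ m (p + 1 + (k : Int)) = false := by
      by_cases hkl : k < rest.length
      · right
        have hstop : rest.getD k false = false := pvTakeWhile_id_stop rest hkl
        have := hget (k + 1) (by simpa using Nat.succ_lt_succ hkl)
        simp only [List.getD_cons_succ] at this
        rw [hstop] at this
        have heq2 : p + 1 + (k : Int) = p + ((k + 1 : Nat) : Int) := by push_cast; ring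
        rw [heq2, ← this]
      · left; omega
    refine ⟨le_refl p, by omega, by omega, by omega, ?_, hend, ?_⟩
    · -- positions p .. p+k are marked
      intro q hq1 hq2
      have hqj : ∃ j : Nat, (j : Int) = q - p ∧ j < k + 1 := ⟨(q - p).toNat, by omega, by omega⟩
      obtain ⟨j, hj1, hj2⟩ := hqj
      have hq : q = p + (j : Int) := by omega
      cases j with
      | zero =>
        have := hget 0 (by simp)
        simp only [List.getD_cons_zero] at this
        rw [hq]; simpa using this.symm
      | succ j' =>
        have htw : rest.getD j' false = true := pvTakeWhile_id_true rest j' (by omega)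
        have := hget (j' + 1) (by simp; omega)
        simp only [List.getD_cons_succ] at this
        rw [htw] at this
        rw [hq]
        exact this.symm
    · -- the remaining runs
      have hlen' : p + 1 + (k : Int) + ((rest.drop k).length : Int) = n := by
        simp only [List.length_drop]; omega
      have hget' : ∀ j : Nat, j < (rest.drop k).length →
          (rest.drop k).getD j false = m (p + 1 + (k : Int) + j) := by
        intro j hj
        simp only [List.length_drop] at hj
        have hd : (rest.drop k).getD j false = rest.getD (k + j) false := by
          simp [List.getD_eq_getElem?_getD, List.getElem?_drop]
        rw [hd]
        have := hget (k + j + 1) (by simp; omega)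
        simp only [List.getD_cons_succ] at this
        rw [this]; congr 1; push_cast; ring
      refine pvRaise_bound m n _ _ (ih hlen' hget') ?_
      rcases hend with h | h
      · left; omega
      · right; exact h

-- characterization of B's mark array
lemma pvSetRange_getD (R : List Int) : ∀ (ml : List Bool) (q : Nat),
    (∀ x ∈ R, 0 ≤ x ∧ x < (ml.length : Int)) →
    ((R.foldl (fun m p => PySem.List.pySetD m p true) ml).getD q false
        = (ml.getD q false || decide ((q : Int) ∈ R)))
    ∧ (R.foldl (fun m p => PySem.List.pySetD m p true) ml).length = ml.length := by
  induction R with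
  | nil => intro ml q hR; simp
  | cons x R ih =>
    intro ml q hR
    have hx := hR x List.mem_cons_self
    have hxl : x.toNat < ml.length := by omega
    have hset : PySem.List.pySetD ml x true = ml.set x.toNat true :=
      PySem.List.pySetD_of_nonneg _ _ (by omega)
    obtain ⟨ihg, ihl⟩ := ih (ml.set x.toNat true) q (by
      intro y hy
      have := hR y (List.mem_cons_of_mem x hy)
      simpa using this)
    rw [List.foldl_cons, hset]
    refine ⟨?_, by rw [ihl, List.length_set]⟩
    rw [ihg]
    have hget : (ml.set x.toNat true).getD q false = (ml.getD q false || decide ((q : Int) = x)) := by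
      simp only [List.getD_eq_getElem?_getD, List.getElem?_set, hxl, if_true]
      by_cases hqx : x.toNat = q
      · have hqi : (q : Int) = x := by omega
        simp [hqx, hqi]
      · have hqi : ¬((q : Int) = x) := by omega
        simp [hqx, hqi]
    rw [hget]
    simp [List.mem_cons, Bool.or_assoc]

lemma pvMarked_getD (n : Int) : ∀ (his : List Int) (ml : List Bool), ml.length = n →
    ((his.foldl (pvMarkStep n) ml).length = ml.length ∧
     ∀ q : Nat, (his.foldl (pvMarkStep n) ml).getD q false
        = (ml.getD q false || his.any (fun i => pvMarkB n i q))) := by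
  intro his
  induction his with
  | nil => intro ml hml; simp
  | cons i his ih =>
    intro ml hml
    by_cases hv : 0 ≤ i ∧ i < n
    · have hstep : pvMarkStep n ml i =
          (PySem.List.pyRange (max 0 (i - 1)) (min n (i + 2)) 1).foldl
            (fun m p => PySem.List.pySetD m p true) ml := by
        simp only [pvMarkStep, if_pos hv]
      have hRmem : ∀ x ∈ PySem.List.pyRange (max 0 (i - 1)) (min n (i + 2)) 1,
          0 ≤ x ∧ x < (ml.length : Int) := by
        intro x hxm
        rw [PySem.List.mem_pyRange_one] at hxm
        omega
      have hchar := fun q => pvSetRange_getD (PySem.List.pyRange (max 0 (i - 1)) (min n (i + 2)) 1) ml q hRmem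
      have hlen2 : ((pvMarkStep n ml i).length : Int) = n := by
        rw [hstep, (hchar 0).2]; exact hml
      obtain ⟨ihl, ihg⟩ := ih (pvMarkStep n ml i) hlen2
      rw [List.foldl_cons]
      refine ⟨by rw [ihl, hstep, (hchar 0).2], ?_⟩
      intro q
      rw [ihg q, hstep, (hchar q).1]
      have hdm : decide ((q : Int) ∈ PySem.List.pyRange (max 0 (i - 1)) (min n (i + 2)) 1)
          = pvMarkB n i q := by
        rw [pvMarkB_eq n i hv.1 hv.2, decide_eq_decide, PySem.List.mem_pyRange_one]
      rw [hdm]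
      simp [Bool.or_assoc]
    · have hstep : pvMarkStep n ml i = ml := by
        simp only [pvMarkStep, if_neg hv]
      obtain ⟨ihl, ihg⟩ := ih ml hml
      rw [List.foldl_cons, hstep]
      refine ⟨ihl, ?_⟩
      intro q
      rw [ihg q]
      have hmb : pvMarkB n i q = false := by
        simp only [pvMarkB, decide_eq_false_iff_not]
        intro hc
        exact hv ⟨hc.1, hc.2.1⟩
      simp [hmb]

-- ===== VERDICT (by name: the statement is the Claim_ definition above) =====
theorem focused_text_NEW_spec : Claim_equal_focused_text_NEW := by
  intro sts ft his _
  unfold Spec_focused_text_NEW focused_text_NEW focused_text_NEW_alt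
  by_cases hguard : sts = [] ∨ his = []
  · rw [if_pos hguard, if_pos hguard]
  · rw [if_neg hguard, if_neg hguard]
    simp only [PySem.List.len_eq]
    set n : Int := (sts.length : Int) with hn
    set mS : Int → Bool := fun p => his.any (fun i => pvMarkB n i p) with hmS
    -- A's ranges are the maximal-run decomposition of the marked predicate
    have hA : pvIsDecomp mS n 0
        ((PySem.List.sorted his (fun x => x) false).foldl (pvStepA n) []) := by
      have h1 := pvMergeA_decomp n (PySem.List.sorted his (fun x => x) false) [] (fun _ => false)
        (by simpa using PySem.List.sorted_pairwise his (fun x => x))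
        (fun p _ _ => rfl)
        (fun _ => fun p => rfl)
        (by intro rs plo phi heq; exact absurd (congrArg List.length heq) (by simp))
      have hfun : (fun p => (fun _ => false) p ||
            (PySem.List.sorted his (fun x => x) false).any (fun i => pvMarkB n i p)) = mS := by
        funext p
        rw [hmS, Bool.false_or, Bool.eq_iff_iff, List.any_eq_true, List.any_eq_true]
        constructor <;> rintro ⟨x, hx, hb⟩ <;>
          exact ⟨x, by simpa [PySem.List.mem_sorted] using hx, hb⟩
      rwa [hfun] at h1
    -- B's marked array realizes the same predicate
    obtain ⟨hMl, hMg⟩ := pvMarked_getD n his (List.replicate sts.length false) (by simp [hn])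
    have hB : pvIsDecomp mS n 0 (pvRunsFrom (his.foldl (pvMarkStep n) (List.replicate sts.length false)) 0) := by
      apply pvRunsFrom_decomp
      · rw [hMl]; simp [hn]
      · intro k hk
        rw [hMg k]
        have hrep : (List.replicate sts.length false).getD k false = false := by
          simp only [List.getD_eq_getElem?_getD, List.getElem?_replicate]
          split <;> rfl
        rw [hrep, Bool.false_or, hmS]
        simp
    have hkey := pvIsDecomp_unique _ _ mS n 0 hA hB
    rw [← hkey]
    by_cases hr : (PySem.List.sorted his (fun x => x) false).foldl (pvStepA n) [] = []
    · rw [if_pos hr, hr]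
      simp
    · rw [if_neg hr, if_neg (by simpa using hr)]
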